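-- pv_equiv track=rewrite | github.com/Mjahnavi2201/python-bootcamp | num_deci.py | check
-- ===== SOURCE A (Python) =====
-- def check(n):
--     sum1,i=0,0
--     while n>0:
--         dig=n%10
--         sum1+=(dig*(2**i))
--         i+=1
--         n//=10
--     return sum1
-- ===== SOURCE B (Python) =====
-- def check(n):
--     if n <= 0:
--         return 0
--     result = 0
--     for ch in str(n):
--         result = result * 2 + int(ch)
--     return result
-- ===== Notes on version B (the rewrite author's own statement) =====
-- stated objective: simpler
-- what changed: Replaces the LSD-first while loop that computes 2**i powers with Horner's method over str(n) most-significant-digit first (result = result*2 + digit), so no power is ever computed.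
import Mathlib
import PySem

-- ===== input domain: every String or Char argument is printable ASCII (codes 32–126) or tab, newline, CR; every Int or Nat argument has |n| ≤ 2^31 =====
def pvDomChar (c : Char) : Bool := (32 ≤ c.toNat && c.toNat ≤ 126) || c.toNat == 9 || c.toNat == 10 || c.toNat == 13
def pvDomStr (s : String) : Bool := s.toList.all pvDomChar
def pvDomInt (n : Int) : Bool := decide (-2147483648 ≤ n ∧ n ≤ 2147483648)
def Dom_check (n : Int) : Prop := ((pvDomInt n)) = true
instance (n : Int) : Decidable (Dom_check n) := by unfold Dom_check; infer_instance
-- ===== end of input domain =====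

-- B replaces the LSD-first while loop with 2**i powers by Horner's method over str(n) (simpler).


-- ===== PORT A =====
-- the while loop; i stays ≥ 0 throughout, so Python's 2**i is 2 ^ i.toNat (exact here)
def checkLoop (n sum1 i : Int) : Int :=
  if h : n > 0 then
    checkLoop (PySem.Int.floordiv n 10) (sum1 + PySem.Int.mod n 10 * 2 ^ i.toNat) (i + 1)
  else sum1
termination_by n.toNat
decreasing_by
  have : PySem.Int.floordiv n 10 = n / 10 := by
    simp [PySem.Int.floordiv, Int.fdiv_eq_ediv]
  rw [this]
  omega

def check (n : Int) : Int := checkLoop n 0 0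

-- ===== PORT B =====
-- int(ch) for the single digit character ch is its code minus 48 (exact: str(n) for n > 0 is all digits)
def check_alt (n : Int) : Int :=
  if n ≤ 0 then 0
  else (PySem.Int.toStr n).toList.foldl (fun r c => r * 2 + ((c.toNat : Int) - 48)) 0

-- ===== PRECONDITION & SPEC =====
def Spec_check (n : Int) (out : Int) : Prop := out = check_alt n
instance (n : Int) (out : Int) : Decidable (Spec_check n out) := by unfold Spec_check; infer_instance

-- ===== CLAIM (what is proved, stated in full; the proofs are below) =====
def Claim_equal_check : Prop := ∀ (n : Int), Dom_check n → Spec_check n (check n)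

-- ===== LEMMAS AND PROOFS =====

-- the common value: Σ digitᵢ(m) · 2^i
def pvVal (m : Nat) : Int :=
  if m = 0 then 0 else ((m % 10 : Nat) : Int) + 2 * pvVal (m / 10)
termination_by m
decreasing_by omega

lemma checkLoop_eq (m : Nat) : ∀ (s i : Int), 0 ≤ i →
    checkLoop (m : Int) s i = s + 2 ^ i.toNat * pvVal m := by
  induction m using Nat.strong_induction_on with
  | _ m ih =>
    intro s i hi
    by_cases hm : m = 0
    · subst hm
      rw [checkLoop]
      simp [pvVal]
    · rw [checkLoop]
      have hpos : (m : Int) > 0 := by omega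
      rw [dif_pos hpos]
      have hdiv : PySem.Int.floordiv (m : Int) 10 = ((m / 10 : Nat) : Int) := by
        have : PySem.Int.floordiv (m : Int) 10 = (m : Int) / 10 := by
          simp [PySem.Int.floordiv, Int.fdiv_eq_ediv]
        rw [this]; omega
      have hmod : PySem.Int.mod (m : Int) 10 = ((m % 10 : Nat) : Int) := by
        have : PySem.Int.mod (m : Int) 10 = (m : Int) % 10 := by
          simp [PySem.Int.mod, Int.fmod_eq_emod]
        rw [this]; omega
      rw [hdiv, hmod, ih (m / 10) (by omega) _ _ (by omega)]
      have hti : (i + 1).toNat = i.toNat + 1 := by omega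
      rw [hti]
      rw [show pvVal m = ((m % 10 : Nat) : Int) + 2 * pvVal (m / 10) from by
        rw [pvVal]; simp [hm]]
      ring

-- Horner accumulator as recursed by toDigitsCore (MSD-first)
def pvHorn (n : Nat) (r : Int) : Int :=
  if n < 10 then r * 2 + (n : Int) else pvHorn (n / 10) r * 2 + ((n % 10 : Nat) : Int)
termination_by n
decreasing_by omega

lemma digitChar_toNat (d : Nat) (hd : d < 10) :
    (((Nat.digitChar d).toNat : Int) - 48) = (d : Int) := by
  interval_cases d <;> decide

lemma foldl_toDigitsCore (fuel : Nat) : ∀ (n : Nat) (ds : List Char) (r : Int), n < fuel →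
    List.foldl (fun r c => r * 2 + ((c.toNat : Int) - 48)) r (Nat.toDigitsCore 10 fuel n ds)
      = List.foldl (fun r c => r * 2 + ((c.toNat : Int) - 48)) (pvHorn n r) ds := by
  induction fuel with
  | zero => intro n ds r h; omega
  | succ fuel ih =>
    intro n ds r h
    by_cases h10 : n / 10 = 0
    · have hn : n < 10 := by omega
      rw [Nat.toDigitsCore]
      simp only [h10, if_true]
      rw [List.foldl_cons]
      rw [show n % 10 = n from Nat.mod_eq_of_lt hn]
      rw [digitChar_toNat n hn]
      rw [pvHorn, if_pos hn]
    · have hge : ¬ n < 10 := by omega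
      rw [Nat.toDigitsCore]
      simp only [h10, if_false]
      rw [ih (n / 10) _ r (by omega)]
      rw [List.foldl_cons]
      rw [digitChar_toNat (n % 10) (by omega)]
      conv_rhs => rw [pvHorn]
      rw [if_neg hge]

lemma pvHorn_eq_pvVal (n : Nat) : pvHorn n 0 = pvVal n := by
  induction n using Nat.strong_induction_on with
  | _ n ih =>
    by_cases h : n < 10
    · rw [pvHorn, if_pos h]
      by_cases h0 : n = 0
      · subst h0; simp [pvVal]
      · rw [pvVal, if_neg h0, pvVal, if_pos (by omega : n / 10 = 0)]
        rw [Nat.mod_eq_of_lt h]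
        ring
    · rw [pvHorn, if_neg h, ih (n / 10) (by omega)]
      rw [show pvVal n = ((n % 10 : Nat) : Int) + 2 * pvVal (n / 10) from by
        rw [pvVal]; simp [show n ≠ 0 by omega]]
      ring

-- ===== VERDICT (by name: the statement is the Claim_ definition above) =====
theorem check_spec : Claim_equal_check := by
  intro n _
  unfold Spec_check check check_alt
  by_cases hn : n ≤ 0
  · rw [checkLoop]
    rw [dif_neg (by omega : ¬ n > 0), if_pos hn]
  · rw [if_neg hn]
    have hrep : n = ((n.toNat : Nat) : Int) := by omega
    rw [PySem.Int.toList_toStr]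
    unfold PySem.Int.toChars
    rw [if_neg (by omega : ¬ n < 0)]
    rw [Nat.toDigits]
    rw [foldl_toDigitsCore _ _ _ _ (by omega)]
    rw [List.foldl_nil, pvHorn_eq_pvVal]
    calc checkLoop n 0 0 = checkLoop ((n.toNat : Nat) : Int) 0 0 := by rw [← hrep]
      _ = 0 + 2 ^ (0 : Int).toNat * pvVal n.toNat := checkLoop_eq n.toNat 0 0 le_rfl
      _ = pvVal n.toNat := by simp
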